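-- pv_equiv track=rewrite | github.com/innovatehubph/boyong_v1 | python/helpers/video_generation.py | _determine_video_style
-- ===== SOURCE A (Python) =====
-- def _determine_video_style(prompt: str) -> str:
--     """Analyze prompt to determine appropriate video style"""
--     prompt_lower = prompt.lower()
--
--     if any(word in prompt_lower for word in ['cinematic', 'dramatic', 'epic', 'film', 'movie']):
--         return "cinematic"
--     elif any(word in prompt_lower for word in ['anime', 'manga', 'cartoon', 'animated']):
--         return "anime"
--     elif any(word in prompt_lower for word in ['realistic', 'real', 'photo', 'lifelike']):
--         return "realistic"
--     elif any(word in prompt_lower for word in ['art', 'artistic', 'creative', 'stylized']):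
--         return "artistic"
--     elif any(word in prompt_lower for word in ['cartoon', 'comic', 'illustration']):
--         return "cartoon"
--     else:
--         return "realistic"  # Default
-- ===== SOURCE B (Python) =====
-- # Inverted index: one flat keyword -> style-priority map; the answer is the
-- # highest-priority (minimum-index) style among all matching keywords.
-- KEYWORD_STYLE = {
--     'cinematic': 0, 'dramatic': 0, 'epic': 0, 'film': 0, 'movie': 0,
--     'anime': 1, 'manga': 1, 'cartoon': 1, 'animated': 1,
--     'realistic': 2, 'real': 2, 'photo': 2, 'lifelike': 2,
--     'art': 3, 'artistic': 3, 'creative': 3, 'stylized': 3,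
--     'comic': 4, 'illustration': 4,
-- }
-- STYLE_NAMES = ['cinematic', 'anime', 'realistic', 'artistic', 'cartoon']
--
-- def _determine_video_style(prompt: str) -> str:
--     p = prompt.lower()
--     best = min((idx for kw, idx in KEYWORD_STYLE.items() if kw in p), default=2)
--     return STYLE_NAMES[best]
-- ===== Notes on version B (the rewrite author's own statement) =====
-- stated objective: idiomatic
-- what changed: Replaced the ordered if/elif category chain by an inverted flat keyword-to-priority map: one pass collects the priorities of all matching keywords and min-aggregates them (default 2 = realistic), then indexes a style-name table.
import Mathlib
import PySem

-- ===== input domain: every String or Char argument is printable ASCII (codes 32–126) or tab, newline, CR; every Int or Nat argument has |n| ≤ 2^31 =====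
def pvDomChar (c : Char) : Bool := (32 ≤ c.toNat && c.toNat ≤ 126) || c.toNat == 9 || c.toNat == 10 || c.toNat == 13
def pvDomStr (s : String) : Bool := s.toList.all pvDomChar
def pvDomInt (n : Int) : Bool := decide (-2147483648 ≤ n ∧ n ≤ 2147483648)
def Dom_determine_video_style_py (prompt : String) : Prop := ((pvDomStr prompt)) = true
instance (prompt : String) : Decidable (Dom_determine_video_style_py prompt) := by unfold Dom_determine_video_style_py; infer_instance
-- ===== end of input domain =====

-- B replaces A's five-branch if/elif chain by an inverted keyword→style-index map aggregated with min (idiomatic; same cost).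


-- ===== PORT A =====
def determine_video_style_py (prompt : String) : String :=
  let prompt_lower := PySem.Str.lower prompt
  if ["cinematic", "dramatic", "epic", "film", "movie"].any (fun word => PySem.Str.isIn word prompt_lower) then
    "cinematic"
  else if ["anime", "manga", "cartoon", "animated"].any (fun word => PySem.Str.isIn word prompt_lower) then
    "anime"
  else if ["realistic", "real", "photo", "lifelike"].any (fun word => PySem.Str.isIn word prompt_lower) then
    "realistic"
  else if ["art", "artistic", "creative", "stylized"].any (fun word => PySem.Str.isIn word prompt_lower) then
    "artistic"
  else if ["cartoon", "comic", "illustration"].any (fun word => PySem.Str.isIn word prompt_lower) then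
    "cartoon"
  else
    "realistic"

-- ===== PORT B =====
-- KEYWORD_STYLE.items() : the dict's pairs in insertion order (all keys distinct)
def pvKeywordStyle : List (String × Nat) :=
  [("cinematic",0),("dramatic",0),("epic",0),("film",0),("movie",0),
   ("anime",1),("manga",1),("cartoon",1),("animated",1),
   ("realistic",2),("real",2),("photo",2),("lifelike",2),
   ("art",3),("artistic",3),("creative",3),("stylized",3),
   ("comic",4),("illustration",4)]

def pvStyleNames : List String := ["cinematic", "anime", "realistic", "artistic", "cartoon"]

-- min(generator, default=2): fold Nat.min over the indices of the matching keywords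
def pvMinStep (p : String) (acc : Option Nat) (kwidx : String × Nat) : Option Nat :=
  if PySem.Str.isIn kwidx.1 p then
    some (match acc with | none => kwidx.2 | some a => min a kwidx.2)
  else acc

def determine_video_style_py_alt (prompt : String) : String :=
  let p := PySem.Str.lower prompt
  let best := (pvKeywordStyle.foldl (pvMinStep p) none).getD 2
  -- STYLE_NAMES[best]: best is always in [0,4], so plain list indexing is exact
  pvStyleNames.getD best "realistic"

-- ===== PRECONDITION & SPEC =====
def Spec_determine_video_style_py (prompt : String) (out : String) : Prop := out = determine_video_style_py_alt prompt
instance (prompt : String) (out : String) : Decidable (Spec_determine_video_style_py prompt out) := by unfold Spec_determine_video_style_py; infer_instance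

-- ===== CLAIM (what is proved, stated in full; the proofs are below) =====
def Claim_equal_determine_video_style_py : Prop := ∀ (prompt : String), Dom_determine_video_style_py prompt → Spec_determine_video_style_py prompt (determine_video_style_py prompt)

-- ===== LEMMAS AND PROOFS =====

-- Folding pvMinStep over a constant-index group: min the index in iff some keyword matches.
theorem fold_group (p : String) (i : Nat) (ws : List String) (acc : Option Nat) :
    List.foldl (pvMinStep p) acc (ws.map (fun w => (w, i))) =
      if ws.any (fun w => PySem.Str.isIn w p) then
        some (match acc with | none => i | some a => min a i)
      else acc := by
  induction ws generalizing acc with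
  | nil => simp
  | cons w ws ih =>
    simp only [List.map_cons, List.foldl_cons, List.any_cons, ih]
    by_cases h : PySem.Str.isIn w p <;>
      cases acc <;>
      simp only [pvMinStep, h, if_true, if_false, Bool.true_or, Bool.false_or,
        Bool.false_eq_true, Nat.min_assoc, Nat.min_self] <;>
      split <;> rfl

theorem kwstyle_split : pvKeywordStyle =
    ((["cinematic","dramatic","epic","film","movie"].map (fun w => (w, 0)) ++
      ["anime","manga","cartoon","animated"].map (fun w => (w, 1))) ++
      ["realistic","real","photo","lifelike"].map (fun w => (w, 2)) ++
      ["art","artistic","creative","stylized"].map (fun w => (w, 3)) ++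
      ["comic","illustration"].map (fun w => (w, 4))) := rfl

-- ===== VERDICT (by name: the statement is the Claim_ definition above) =====
theorem determine_video_style_py_spec : Claim_equal_determine_video_style_py := by
  intro prompt _
  unfold Spec_determine_video_style_py determine_video_style_py determine_video_style_py_alt
  set p := PySem.Str.lower prompt with hp
  rw [kwstyle_split]
  simp only [List.foldl_append, fold_group]
  by_cases h0 : ["cinematic","dramatic","epic","film","movie"].any (fun w => PySem.Str.isIn w p) <;>
  by_cases h1 : ["anime","manga","cartoon","animated"].any (fun w => PySem.Str.isIn w p) <;>
  by_cases h2 : ["realistic","real","photo","lifelike"].any (fun w => PySem.Str.isIn w p) <;>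
  by_cases h3 : ["art","artistic","creative","stylized"].any (fun w => PySem.Str.isIn w p) <;>
  by_cases h4 : ["comic","illustration"].any (fun w => PySem.Str.isIn w p) <;>
    simp_all [pvStyleNames]
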